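-- pv_equiv track=rewrite | github.com/HashemBader/LCCN-Harvester-Project | src/utils/nlmcn_validator.py | _is_valid_nlmcn_remainder
-- ===== SOURCE A (Python) =====
-- def _is_valid_nlmcn_remainder(remainder: str) -> bool:
--     """
--     Validate the inline decimal extension of an NLM class number token.
--
--     Handles patterns like ``.5``, ``.A1``, ``.123`` appended directly to the
--     class digits within the second space-token (e.g., the ``.5`` in ``120.5``).
--
--     Parameters
--     ----------
--     remainder : str
--         Substring of the class number token that follows the leading digits.
--
--     Returns
--     -------
--     bool
--     """
--     if not remainder:
--         return True
--
--     # The decimal extension must begin with a period.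
--     if not remainder.startswith("."):
--         return False
--
--     # Validate each dot-separated segment (skip the empty first segment from
--     # the leading ".").
--     segments = remainder.split(".")
--
--     for segment in segments[1:]:
--         if not segment:
--             # Empty segment (double period / trailing period) — tolerated.
--             continue
--
--         for ch in segment:
--             if not ch.isalnum():
--                 return False
--
--     return True
-- ===== SOURCE B (Python) =====
-- def _is_valid_nlmcn_remainder(remainder: str) -> bool:
--     """Flat single-pass validation: empty is valid; otherwise the remainder
--     must start with '.' and every character must be '.' or alphanumeric."""
--     if not remainder:
--         return True
--     return remainder.startswith(".") and all(
--         ch == "." or ch.isalnum() for ch in remainder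
--     )
-- ===== Notes on version B (the rewrite author's own statement) =====
-- stated objective: simpler
-- what changed: Replaces split-on-'.' plus a nested loop over segments and their characters by one flat scan of the raw string (startswith '.' and every char is '.' or alphanumeric); the segment list and the empty-segment special case disappear.
import Mathlib
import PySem

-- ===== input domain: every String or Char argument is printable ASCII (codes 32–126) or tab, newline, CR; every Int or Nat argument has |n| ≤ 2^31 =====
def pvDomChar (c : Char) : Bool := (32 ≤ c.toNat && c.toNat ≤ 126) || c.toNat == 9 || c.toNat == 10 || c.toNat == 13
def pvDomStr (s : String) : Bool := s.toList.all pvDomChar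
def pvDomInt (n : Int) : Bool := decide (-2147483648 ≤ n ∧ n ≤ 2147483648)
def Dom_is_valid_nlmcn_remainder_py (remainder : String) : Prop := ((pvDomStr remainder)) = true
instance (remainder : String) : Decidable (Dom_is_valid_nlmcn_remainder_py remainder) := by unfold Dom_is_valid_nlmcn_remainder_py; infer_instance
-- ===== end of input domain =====

-- B replaces A's split-into-dot-segments plus nested segment/character loops by one flat scan
-- of the raw characters behind a startswith('.') check; objective: simpler.

-- ===== PORT A =====
-- inner loop: 'for ch in segment: if not ch.isalnum(): return False'
def pvA_charLoop : List Char → Bool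
  | [] => true
  | c :: rest => if !(PySem.Chars.isalnum c) then false else pvA_charLoop rest

-- outer loop: 'for segment in segments[1:]: …'
def pvA_segLoop : List String → Bool
  | [] => true
  | seg :: rest =>
      if seg = "" then pvA_segLoop rest
      else if pvA_charLoop seg.toList then pvA_segLoop rest else false

def is_valid_nlmcn_remainder_py (remainder : String) : Bool :=
  if remainder = "" then true
  else if !(PySem.Str.startswith remainder ".") then false
  else
    -- remainder.split("."): sep "." is non-empty so split? is always some; getD [] unwraps it
    pvA_segLoop (((PySem.Str.split? remainder ".").getD []).drop 1)

-- ===== PORT B =====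
def is_valid_nlmcn_remainder_py_alt (remainder : String) : Bool :=
  if remainder = "" then true
  else PySem.Str.startswith remainder "." &&
       remainder.toList.all (fun ch => ch == '.' || PySem.Chars.isalnum ch)

-- ===== PRECONDITION & SPEC =====
def Spec_is_valid_nlmcn_remainder_py (remainder : String) (out : Bool) : Prop := out = is_valid_nlmcn_remainder_py_alt remainder
instance (remainder : String) (out : Bool) : Decidable (Spec_is_valid_nlmcn_remainder_py remainder out) := by unfold Spec_is_valid_nlmcn_remainder_py; infer_instance

-- ===== CLAIM (what is proved, stated in full; the proofs are below) =====
def Claim_equal_is_valid_nlmcn_remainder_py : Prop := ∀ (remainder : String), Dom_is_valid_nlmcn_remainder_py remainder → Spec_is_valid_nlmcn_remainder_py remainder (is_valid_nlmcn_remainder_py remainder)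

-- ===== LEMMAS AND PROOFS =====

theorem pvA_charLoop_eq (l : List Char) : pvA_charLoop l = l.all PySem.Chars.isalnum := by
  induction l with
  | nil => rfl
  | cons c rest ih => by_cases h : PySem.Chars.isalnum c <;> simp [pvA_charLoop, h, ih]

theorem pvA_segLoop_eq (ss : List String) :
    pvA_segLoop ss = ss.all (fun s => s.toList.all PySem.Chars.isalnum) := by
  induction ss with
  | nil => rfl
  | cons seg rest ih =>
      simp only [pvA_segLoop, pvA_charLoop_eq, List.all_cons]
      by_cases h0 : seg = ""
      · subst h0; simp [ih]
      · rw [if_neg h0]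
        cases h1 : seg.toList.all PySem.Chars.isalnum
        · simp
        · simp [ih]

-- structural reference splitter on characters: what splitOn.go with sep = ['.'] computes
def pvSpl : List Char → List Char → List (List Char)
  | cur, [] => [cur.reverse]
  | cur, c :: rest => if c = '.' then cur.reverse :: pvSpl [] rest else pvSpl (c :: cur) rest

theorem pvGo_eq (l : List Char) : ∀ (fuel : Nat) (cur : List Char) (acc : List (List Char)),
    l.length ≤ fuel →
    PySem.Chars.splitOn.go ['.'] fuel l cur acc = acc.reverse ++ pvSpl cur l := by
  induction l with
  | nil =>
      intro fuel cur acc _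
      cases fuel <;> simp [PySem.Chars.splitOn.go, pvSpl]
  | cons c rest ih =>
      intro fuel cur acc hle
      cases fuel with
      | zero => simp at hle
      | succ f =>
          by_cases hc : c = '.'
          · subst hc
            have hpre : List.isPrefixOf ['.'] ('.' :: rest) = true :=
              List.isPrefixOf_iff_prefix.mpr ⟨rest, rfl⟩
            simp only [PySem.Chars.splitOn.go, hpre, if_pos, List.length_cons,
              List.length_nil, List.drop_succ_cons, List.drop_zero] at *
            rw [ih f [] (List.reverse cur :: acc) (by omega)]
            simp [pvSpl]
          · have hpre : List.isPrefixOf ['.'] (c :: rest) = false := by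
              apply Bool.eq_false_iff.mpr
              intro h
              obtain ⟨u, hu⟩ := List.isPrefixOf_iff_prefix.mp h
              rw [List.cons_append, List.nil_append] at hu
              injection hu with h1 _
              exact hc h1.symm
            simp only [PySem.Chars.splitOn.go, hpre, Bool.false_eq_true, if_neg,
              not_false_iff, List.length_cons] at *
            rw [ih f (c :: cur) acc (by omega)]
            simp [pvSpl, hc]

theorem pvSplitOn_eq (l : List Char) : PySem.Chars.splitOn l ['.'] = pvSpl [] l := by
  have := pvGo_eq l (l.length + 1) [] [] (by omega)
  simpa [PySem.Chars.splitOn] using this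

theorem pvSpl_all (l : List Char) : ∀ (cur : List Char),
    (pvSpl cur l).all (fun seg => seg.all PySem.Chars.isalnum) =
      (cur.all PySem.Chars.isalnum && l.all (fun ch => ch == '.' || PySem.Chars.isalnum ch)) := by
  induction l with
  | nil => intro cur; simp [pvSpl]
  | cons c rest ih =>
      intro cur
      by_cases hc : c = '.'
      · subst hc
        simp [pvSpl, ih]
      · have hb : (c == '.') = false := by simp [hc]
        simp [pvSpl, hc, ih, hb, Bool.and_assoc, Bool.and_comm]

-- ===== VERDICT (by name: the statement is the Claim_ definition above) =====
theorem is_valid_nlmcn_remainder_py_spec : Claim_equal_is_valid_nlmcn_remainder_py := by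
  intro remainder _
  unfold Spec_is_valid_nlmcn_remainder_py is_valid_nlmcn_remainder_py is_valid_nlmcn_remainder_py_alt
  by_cases h0 : remainder = ""
  · simp [h0]
  · by_cases hs : PySem.Str.startswith remainder "." = true
    · -- remainder starts with '.': remainder.toList = '.' :: t
      have hpre : ['.'] <+: remainder.toList := by
        have h1 : PySem.Chars.startswith remainder.toList (".").toList = true := by
          simpa using hs
        have h2 : (".").toList = ['.'] := by decide
        rw [h2] at h1
        exact (PySem.Chars.startswith_iff _ _).mp h1
      obtain ⟨t, ht⟩ := hpre
      have ht' : remainder.toList = '.' :: t := by simpa using ht.symm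
      simp only [h0, if_neg, hs, Bool.not_true, Bool.false_eq_true,
        not_false_iff, Bool.true_and]
      rw [pvA_segLoop_eq]
      have hsplit : (PySem.Str.split? remainder ".").getD [] =
          (PySem.Chars.splitOn remainder.toList ['.']).map String.ofList := by
        simp [PySem.Str.split?, PySem.Chars.split?]
      rw [hsplit, pvSplitOn_eq, ht']
      simp [pvSpl, List.all_map]
      have hfun : ((fun s : String => s.toList.all PySem.Chars.isalnum) ∘ String.ofList)
          = fun cs : List Char => cs.all PySem.Chars.isalnum := by
        funext cs; simp
      rw [hfun, pvSpl_all]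
      simp
    · have hs' : PySem.Chars.startswith remainder.toList ['.'] = false := by
        simpa using hs
      simp [h0, hs']
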